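-- pv_equiv track=rewrite | github.com/febil01/My-Python-Programs | cinema.py | validateSeat
-- ===== SOURCE A (Python) =====
-- def validateSeat(seatList,seatingDict):
--     check=0
--     for i in seatingDict:
--         for j in seatList:
--             if j == i:
--                 check=check+1
--                 break
--     if check==len(seatList):
--         return True
--     return False
-- ===== SOURCE B (Python) =====
-- def validateSeat(seatList, seatingDict):
--     seen = set()
--     for s in seatList:
--         if s in seatingDict and s not in seen:
--             seen.add(s)
--     return len(seen) == len(seatList)
-- ===== Notes on version B (the rewrite author's own statement) =====
-- stated objective: faster
-- what changed: Replaces the nested loop (each dict key scanned against seatList) by a single pass over seatList collecting the distinct seats that are dict keys into a set, then compares the set's size with len(seatList).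
import Mathlib
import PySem

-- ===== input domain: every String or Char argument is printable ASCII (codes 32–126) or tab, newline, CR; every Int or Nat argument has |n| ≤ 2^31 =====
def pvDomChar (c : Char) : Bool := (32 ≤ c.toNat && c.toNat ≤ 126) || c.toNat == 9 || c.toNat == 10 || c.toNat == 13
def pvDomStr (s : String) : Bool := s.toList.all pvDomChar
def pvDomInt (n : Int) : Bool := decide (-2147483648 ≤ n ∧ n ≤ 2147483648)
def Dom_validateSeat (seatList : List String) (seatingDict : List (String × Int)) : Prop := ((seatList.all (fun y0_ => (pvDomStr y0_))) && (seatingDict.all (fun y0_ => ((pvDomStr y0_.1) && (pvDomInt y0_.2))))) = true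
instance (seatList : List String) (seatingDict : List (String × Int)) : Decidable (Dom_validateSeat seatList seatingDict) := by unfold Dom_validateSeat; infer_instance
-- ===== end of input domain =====

-- B replaces A's nested loop (each dict key scanned against seatList) by one pass over
-- seatList collecting the distinct seats that are dict keys into a set; simpler, one pass.

-- ===== PORT A =====
-- inner 'for j in seatList: if j == i: check += 1; break' — contribution of one key i
def pvInnerA (i : String) : List String → Int
  | [] => 0
  | j :: rest => if j == i then 1 else pvInnerA i rest

def validateSeat (seatList : List String) (seatingDict : List (String × Int)) : Bool :=
  let check : Int := (PySem.Dict.keys (PySem.Dict.mk seatingDict)).foldl (fun c i => c + pvInnerA i seatList) 0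
  if check == (seatList.length : Int) then true else false

-- ===== PORT B =====
def validateSeat_alt (seatList : List String) (seatingDict : List (String × Int)) : Bool :=
  let seen : PySem.Set String :=
    seatList.foldl
      (fun seen s =>
        if PySem.Dict.contains (PySem.Dict.mk seatingDict) s && !(PySem.Set.contains seen s) then
          PySem.Set.add seen s
        else seen)
      PySem.Set.empty
  decide ((PySem.Set.len seen) = (seatList.length : Int))

-- ===== PRECONDITION & SPEC =====
-- Pre_ requires the association list to have pairwise-distinct keys: it stands for a Python
-- dict, which cannot carry duplicate keys, so lists with repeated keys represent no Python input.
def Pre_validateSeat (seatList : List String) (seatingDict : List (String × Int)) : Prop :=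
  (seatingDict.map Prod.fst).Nodup
instance (seatList : List String) (seatingDict : List (String × Int)) : Decidable (Pre_validateSeat seatList seatingDict) := by unfold Pre_validateSeat; infer_instance

def pvWitness_validateSeat : List String × (List (String × Int)) :=
  (["A1", "B2"], [("A1", 1), ("B2", 2), ("C3", 3)])

def Spec_validateSeat (seatList : List String) (seatingDict : List (String × Int)) (out : Bool) : Prop := out = validateSeat_alt seatList seatingDict
instance (seatList : List String) (seatingDict : List (String × Int)) (out : Bool) : Decidable (Spec_validateSeat seatList seatingDict out) := by unfold Spec_validateSeat; infer_instance

-- ===== CLAIM (what is proved, stated in full; the proofs are below) =====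
def Claim_equal_validateSeat : Prop := ∀ (seatList : List String) (seatingDict : List (String × Int)), Dom_validateSeat seatList seatingDict → Pre_validateSeat seatList seatingDict → Spec_validateSeat seatList seatingDict (validateSeat seatList seatingDict)

-- ===== LEMMAS AND PROOFS =====

theorem pvInnerA_eq (i : String) (sl : List String) :
    pvInnerA i sl = if sl.contains i then 1 else 0 := by
  induction sl with
  | nil => simp [pvInnerA]
  | cons j rest ih =>
    rcases eq_or_ne j i with he | he
    · subst he; simp [pvInnerA]
    · have h1 : (j == i) = false := by simp [he]
      have h2 : (i == j) = false := by simp [Ne.symm he]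
      simp [pvInnerA, h1, ih, Ne.symm he]

theorem foldl_check (sl : List String) (keys : List String) (c : Int) :
    keys.foldl (fun c i => c + pvInnerA i sl) c
      = c + ((keys.filter (fun i => sl.contains i)).length : Int) := by
  induction keys generalizing c with
  | nil => simp
  | cons k rest ih =>
    rw [List.foldl_cons, ih, List.filter_cons, pvInnerA_eq]
    by_cases h : k ∈ sl
    · have hc : sl.contains k = true := by simpa using h
      simp only [hc, if_pos, List.length_cons]
      push_cast; ring
    · have hc : sl.contains k = false := by simpa using h
      simp [h]

theorem foldl_seen (sd : List (String × Int)) (sl : List String) (seen : PySem.Set String) :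
    sl.foldl
      (fun seen s =>
        if PySem.Dict.contains (PySem.Dict.mk sd) s && !(PySem.Set.contains seen s) then
          PySem.Set.add seen s
        else seen) seen
      = (sl.filter (fun s => PySem.Dict.contains (PySem.Dict.mk sd) s)).foldl PySem.Set.add seen := by
  induction sl generalizing seen with
  | nil => rfl
  | cons s rest ih =>
    simp only [List.foldl_cons, List.filter_cons]
    by_cases h : PySem.Dict.contains (PySem.Dict.mk sd) s
    · have hstep : (if PySem.Dict.contains (PySem.Dict.mk sd) s && !(PySem.Set.contains seen s) then
          PySem.Set.add seen s else seen) = PySem.Set.add seen s := by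
        by_cases hc : PySem.Set.contains seen s <;>
          simp [h, PySem.Set.add]
      rw [hstep]; simp only [h, if_pos]; exact ih _
    · have hstep : (if PySem.Dict.contains (PySem.Dict.mk sd) s && !(PySem.Set.contains seen s) then
          PySem.Set.add seen s else seen) = seen := by simp [h]
      rw [hstep]
      simpa [h] using ih seen

theorem validateSeat_spec_aux (sl : List String) (sd : List (String × Int))
    (hnd : (sd.map Prod.fst).Nodup) :
    validateSeat sl sd = validateSeat_alt sl sd := by
  have hkeys : (PySem.Dict.keys (PySem.Dict.mk sd)).Nodup := by
    simpa [PySem.Dict.keys] using hnd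
  have hA : validateSeat sl sd
      = decide ((((PySem.Dict.keys (PySem.Dict.mk sd)).filter (fun i => sl.contains i)).length : Int)
          = (sl.length : Int)) := by
    simp [validateSeat, foldl_check]
  have hseen :
      (sl.foldl
        (fun seen s =>
          if PySem.Dict.contains (PySem.Dict.mk sd) s && !(PySem.Set.contains seen s) then
            PySem.Set.add seen s
          else seen) PySem.Set.empty)
      = PySem.Set.ofList (sl.filter (fun s => PySem.Dict.contains (PySem.Dict.mk sd) s)) := by
    rw [foldl_seen]
    rw [PySem.Set.ofList_eq_foldl]
    rfl
  have hB : validateSeat_alt sl sd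
      = decide (((PySem.Set.ofList (sl.filter (fun s => PySem.Dict.contains (PySem.Dict.mk sd) s))).length : Int)
          = (sl.length : Int)) := by
    simp only [validateSeat_alt, hseen, PySem.Set.len]
  have hlen : ((PySem.Dict.keys (PySem.Dict.mk sd)).filter (fun i => sl.contains i)).length
      = (PySem.Set.ofList (sl.filter (fun s => PySem.Dict.contains (PySem.Dict.mk sd) s))).length := by
    have h1 : ((PySem.Dict.keys (PySem.Dict.mk sd)).filter (fun i => sl.contains i)).Nodup :=
      hkeys.filter _
    have h2 : (PySem.Set.ofList (sl.filter (fun s => PySem.Dict.contains (PySem.Dict.mk sd) s))).Nodup :=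
      PySem.Set.nodup_ofList _
    have hperm := (List.perm_ext_iff_of_nodup h1 h2).2 (fun x => by
      simp [PySem.Set.mem_ofList, List.mem_filter]
      tauto)
    exact hperm.length_eq
  rw [hA, hB, hlen]

-- ===== VERDICT (by name: the statement is the Claim_ definition above) =====
theorem validateSeat_spec : Claim_equal_validateSeat := by
  intro sl sd _ hpre
  exact validateSeat_spec_aux sl sd hpre
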